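-- pv_equiv track=rewrite | github.com/shawn-dolifka/90th-basic-dev-practice | Python/3_card_guts.py | findGutsWinner
-- ===== SOURCE A (Python) =====
-- THREE_OF_KIND = 3
--
-- TWO_OF_KIND = 2
--
-- def findGutsWinner(hand1, hand2):
--   if len(hand1) != 3 or len(hand2) != 3:
--     return []
--
--   cards_p1 = {}
--   cards_p2 = {}
--
--   # Find 2 and 3 of a kinds in hands with dictionary matches
--   for i in range(3):
--     p1_card = hand1[i]
--     p2_card = hand2[i]
--     cards_p1[p1_card] = cards_p1.get(p1_card, 0) + 1
--     cards_p2[p2_card] = cards_p2.get(p2_card, 0) + 1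
--
--   # Player 1 has 3 of a kind and Player 2 doesn't
--   if THREE_OF_KIND in cards_p1.values() and THREE_OF_KIND not in cards_p2.values():
--     return hand1
--   # Player 2 has 3 of a kind and Player 1 doesn't
--   if THREE_OF_KIND in cards_p2.values() and THREE_OF_KIND not in cards_p1.values():
--     return hand2
--   # Both players have 3 of a kind
--   if THREE_OF_KIND in cards_p1.values() and THREE_OF_KIND in cards_p2.values():
--     p1_high = p2_high = 0
--
--     # Find the highest card for Player 1
--     for key, value in cards_p1.items():
--       if value == THREE_OF_KIND:
--         p1_high = key
--
--     # Find the highest card for Player 2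
--     for key, value in cards_p2.items():
--       if value == THREE_OF_KIND:
--         p2_high = key
--
--     # Player with the higher card wins
--     if p1_high > p2_high:
--       return hand1
--     else:
--       return hand2
--
--
--   # Player 1 has a pair and Player 2 doesn't
--   if TWO_OF_KIND in cards_p1.values() and TWO_OF_KIND not in cards_p2.values():
--     return hand1
--   # Player 2 has a pair and Player 1 doesn't
--   if TWO_OF_KIND in cards_p2.values() and TWO_OF_KIND not in cards_p1.values():
--     return hand2
--   # Both players have a pair
--   if TWO_OF_KIND in cards_p1.values() and TWO_OF_KIND in cards_p2.values():
--     p1_high = p2_high = 0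
--
--     # Find the highest card for Player 1
--     for key, value in cards_p1.items():
--       if value == TWO_OF_KIND:
--         p1_high = key
--
--     # Find the highest card for Player 2
--     for key, value in cards_p2.items():
--       if value == TWO_OF_KIND:
--         p2_high = key
--
--     # Player with the higher card wins
--     if p1_high > p2_high:
--       return hand1
--     else:
--       return hand2
--
--   # No one has matches. Highest card wins
--   if max(cards_p1) > max(cards_p2):
--     return hand1
--   else:
--     return hand2
-- ===== SOURCE B (Python) =====
-- def _score(hand):
--     for c in hand:
--         if hand.count(c) == 3:
--             return (2, c)
--     for c in hand:
--         if hand.count(c) == 2: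
--             return (1, c)
--     return (0, max(hand))
--
-- def findGutsWinner(hand1, hand2):
--     if len(hand1) != 3 or len(hand2) != 3:
--         return []
--     return hand1 if _score(hand1) > _score(hand2) else hand2
-- ===== Notes on version B (the rewrite author's own statement) =====
-- stated objective: simpler
-- what changed: Replaces A's two-dict counting loop and six-branch category cascade with a single score(hand) helper returning a (category, high-card) key, the winner picked by one lexicographic tuple comparison (ties to hand2 via strict >).
import Mathlib
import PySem

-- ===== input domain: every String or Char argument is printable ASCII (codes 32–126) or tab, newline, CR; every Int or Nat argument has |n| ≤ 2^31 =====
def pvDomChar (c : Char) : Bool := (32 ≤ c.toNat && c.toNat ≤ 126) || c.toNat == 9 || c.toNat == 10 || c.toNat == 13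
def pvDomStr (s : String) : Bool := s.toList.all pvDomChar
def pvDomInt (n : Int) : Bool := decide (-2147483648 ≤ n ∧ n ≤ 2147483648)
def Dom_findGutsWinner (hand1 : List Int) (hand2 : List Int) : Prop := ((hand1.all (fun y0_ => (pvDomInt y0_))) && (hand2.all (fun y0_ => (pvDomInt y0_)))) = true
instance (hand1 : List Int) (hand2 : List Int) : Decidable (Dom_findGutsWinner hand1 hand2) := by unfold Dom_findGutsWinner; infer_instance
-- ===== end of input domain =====

-- B replaces A's dict-counting six-branch cascade by one comparison key (category, high card)
-- compared lexicographically; objective: simpler. Return values proved equal on all inputs.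

-- ===== PORT A =====
def findGutsWinner (hand1 : List Int) (hand2 : List Int) : List Int :=
  if hand1.length ≠ 3 ∨ hand2.length ≠ 3 then []
  else
    -- for i in range(3): count both hands' cards into two dicts
    let cards :=
      (PySem.List.pyRange 0 3 1).foldl
        (fun (s : PySem.Dict Int Int × PySem.Dict Int Int) i =>
          let p1 := PySem.List.pyGetD hand1 i 0   -- index always in range here (len = 3)
          let p2 := PySem.List.pyGetD hand2 i 0
          (s.1.insert p1 (s.1.getD p1 0 + 1), s.2.insert p2 (s.2.getD p2 0 + 1)))
        (PySem.Dict.empty, PySem.Dict.empty)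
    let cards_p1 := cards.1
    let cards_p2 := cards.2
    if cards_p1.values.contains 3 && !(cards_p2.values.contains 3) then hand1
    else if cards_p2.values.contains 3 && !(cards_p1.values.contains 3) then hand2
    else if cards_p1.values.contains 3 && cards_p2.values.contains 3 then
      let p1_high := cards_p1.items.foldl (fun h kv => if kv.2 == 3 then kv.1 else h) (0 : Int)
      let p2_high := cards_p2.items.foldl (fun h kv => if kv.2 == 3 then kv.1 else h) (0 : Int)
      if p1_high > p2_high then hand1 else hand2
    else if cards_p1.values.contains 2 && !(cards_p2.values.contains 2) then hand1
    else if cards_p2.values.contains 2 && !(cards_p1.values.contains 2) then hand2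
    else if cards_p1.values.contains 2 && cards_p2.values.contains 2 then
      let p1_high := cards_p1.items.foldl (fun h kv => if kv.2 == 2 then kv.1 else h) (0 : Int)
      let p2_high := cards_p2.items.foldl (fun h kv => if kv.2 == 2 then kv.1 else h) (0 : Int)
      if p1_high > p2_high then hand1 else hand2
    else
      -- max(dict) iterates the keys; dicts are nonempty here, so getD 0 is never taken
      if (PySem.List.max? cards_p1.keys (fun x => x)).getD 0 >
         (PySem.List.max? cards_p2.keys (fun x => x)).getD 0 then hand1 else hand2

-- ===== PORT B =====
-- _score(hand): (2, tripled card) / (1, paired card) / (0, max card)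
def scoreHand (hand : List Int) : Int × Int :=
  match hand.find? (fun c => PySem.List.count hand c == 3) with
  | some c => (2, c)
  | none =>
    match hand.find? (fun c => PySem.List.count hand c == 2) with
    | some c => (1, c)
    | none => (0, (PySem.List.max? hand (fun x => x)).getD 0)  -- hand nonempty at call site

def findGutsWinner_alt (hand1 : List Int) (hand2 : List Int) : List Int :=
  if hand1.length ≠ 3 ∨ hand2.length ≠ 3 then []
  else
    let s1 := scoreHand hand1
    let s2 := scoreHand hand2
    -- Python tuple comparison s1 > s2, lexicographic strict
    if s1.1 > s2.1 ∨ (s1.1 = s2.1 ∧ s1.2 > s2.2) then hand1 else hand2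

-- ===== PRECONDITION & SPEC =====
def Spec_findGutsWinner (hand1 : List Int) (hand2 : List Int) (out : List Int) : Prop := out = findGutsWinner_alt hand1 hand2
instance (hand1 : List Int) (hand2 : List Int) (out : List Int) : Decidable (Spec_findGutsWinner hand1 hand2 out) := by unfold Spec_findGutsWinner; infer_instance

-- ===== CLAIM (what is proved, stated in full; the proofs are below) =====
def Claim_equal_findGutsWinner : Prop := ∀ (hand1 : List Int) (hand2 : List Int), Dom_findGutsWinner hand1 hand2 → Spec_findGutsWinner hand1 hand2 (findGutsWinner hand1 hand2)

-- ===== LEMMAS AND PROOFS =====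

theorem beq_symm_false {a b : Int} (h : ¬ a = b) : (b == a) = false := by
  simp [Ne.symm h]

theorem ite_symm_eq {α : Type} {a b : Int} (h : ¬ a = b) (s t : α) : (if b = a then s else t) = t := by
  rw [if_neg (Ne.symm h)]

theorem getD_ite {c : Prop} [inst : Decidable c] (a b d : Int) :
    (if c then some a else some b).getD d = if c then a else b := by
  split_ifs <;> rfl

set_option maxHeartbeats 1000000 in
theorem handSummary (x y z : Int) :
    ((PySem.Dict.counter [x,y,z]).values.contains 3 = ((scoreHand [x,y,z]).1 == 2)) ∧
    ((PySem.Dict.counter [x,y,z]).values.contains 2 = ((scoreHand [x,y,z]).1 == 1)) ∧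
    ((scoreHand [x,y,z]).1 = 2 →
      (PySem.Dict.counter [x,y,z]).items.foldl (fun h kv => if kv.2 == 3 then kv.1 else h) (0 : Int)
        = (scoreHand [x,y,z]).2) ∧
    ((scoreHand [x,y,z]).1 = 1 →
      (PySem.Dict.counter [x,y,z]).items.foldl (fun h kv => if kv.2 == 2 then kv.1 else h) (0 : Int)
        = (scoreHand [x,y,z]).2) ∧
    ((scoreHand [x,y,z]).1 = 0 →
      (PySem.List.max? (PySem.Dict.counter [x,y,z]).keys (fun k => k)).getD 0 = (scoreHand [x,y,z]).2) ∧
    ((scoreHand [x,y,z]).1 = 0 ∨ (scoreHand [x,y,z]).1 = 1 ∨ (scoreHand [x,y,z]).1 = 2) := by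
  by_cases h1 : x = y <;> by_cases h2 : x = z <;> by_cases h3 : y = z <;> subst_vars <;>
    (try simp_all [scoreHand, PySem.Dict.values, PySem.Dict.keys, PySem.Dict.items_counter,
      PySem.Set.ofList, PySem.Set.add, PySem.List.count, PySem.List.max?, List.find?, beq_symm_false, ite_symm_eq, List.count_cons, List.count_nil, getD_ite]) <;>
    (try split_ifs) <;> (try simp_all [scoreHand, PySem.Dict.values, PySem.Dict.keys, PySem.Dict.items_counter,
      PySem.Set.ofList, PySem.Set.add, PySem.List.count, PySem.List.max?, List.find?, beq_symm_false, ite_symm_eq, List.count_cons, List.count_nil, getD_ite]) <;> (try split_ifs) <;> (try simp_all [getD_ite]) <;> (try split_ifs) <;> (try simp_all) <;> omega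

theorem countChain (a b c d e f : Int) :
  (PySem.List.pyRange 0 3 1).foldl
    (fun (s : PySem.Dict Int Int × PySem.Dict Int Int) i =>
      (s.1.insert (PySem.List.pyGetD [a,b,c] i 0) (s.1.getD (PySem.List.pyGetD [a,b,c] i 0) 0 + 1),
       s.2.insert (PySem.List.pyGetD [d,e,f] i 0) (s.2.getD (PySem.List.pyGetD [d,e,f] i 0) 0 + 1)))
    (PySem.Dict.empty, PySem.Dict.empty)
  = (PySem.Dict.counter [a,b,c], PySem.Dict.counter [d,e,f]) := rfl

set_option maxHeartbeats 1000000 in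
theorem key_eq (a b c d e f : Int) :
    findGutsWinner [a,b,c] [d,e,f] = findGutsWinner_alt [a,b,c] [d,e,f] := by
  obtain ⟨A1, A2, A3, A4, A5, A6⟩ := handSummary a b c
  obtain ⟨B1, B2, B3, B4, B5, B6⟩ := handSummary d e f
  simp only [findGutsWinner, findGutsWinner_alt, countChain]
  rcases A6 with hA|hA|hA <;> rcases B6 with hB|hB|hB <;>
    simp_all <;> (try split_ifs) <;> first | rfl | omega

-- ===== VERDICT (by name: the statement is the Claim_ definition above) =====
theorem findGutsWinner_spec : Claim_equal_findGutsWinner := by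
  intro h1 h2 _
  unfold Spec_findGutsWinner
  by_cases l1 : h1.length = 3
  · by_cases l2 : h2.length = 3
    · obtain ⟨a,b,c,rfl⟩ := List.length_eq_three.mp l1
      obtain ⟨d,e,f,rfl⟩ := List.length_eq_three.mp l2
      exact key_eq a b c d e f
    · simp [findGutsWinner, findGutsWinner_alt, l2]
  · simp [findGutsWinner, findGutsWinner_alt, l1]
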